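-- pv_equiv track=rewrite | github.com/Chiuzu-Chilumbu/HackerRank-Three-Month-Preparation-Kit | week5/SansaXor.py | sansaXor
-- ===== SOURCE A (Python) =====
-- def sansaXor(arr):
--     """
--     Args:
--     arr (list): A list of integers.
--
--     Returns:
--         int: The result of XOR for the relevant elements based on the array's length.
--
--     """
--     n = len(arr)
--     result = 0
--
--     if n % 2 == 0:
--         # If the length of the array is even, all elements appear an even number of times
--         return 0
--     else:
--         # XOR elements that are at indices which contribute an odd number of times
--         for i in range(0, n, 2):  # Only odd indices (including 0) need to be considered
--             result ^= arr[i]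
--
--     return result
-- ===== SOURCE B (Python) =====
-- def sansaXor(arr):
--     n = len(arr)
--     acc = 0
--     for i, x in enumerate(arr):
--         # x occurs in (i+1)*(n-i) contiguous subarrays; keep it iff that count is odd.
--         # Branch-free: multiply by the parity bit (x*0 == 0 is the XOR identity).
--         acc ^= x * (((i + 1) * (n - i)) % 2)
--     return acc
-- ===== Notes on version B (the rewrite author's own statement) =====
-- stated objective: alternative
-- what changed: Replaced the length-parity branch plus even-index stride-2 loop by a single branch-free enumerate pass that XORs x*(((i+1)*(n-i))%2), i.e. masks each element by the parity of its subarray-occurrence count, which uniformly yields 0 for even n.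
import Mathlib
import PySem

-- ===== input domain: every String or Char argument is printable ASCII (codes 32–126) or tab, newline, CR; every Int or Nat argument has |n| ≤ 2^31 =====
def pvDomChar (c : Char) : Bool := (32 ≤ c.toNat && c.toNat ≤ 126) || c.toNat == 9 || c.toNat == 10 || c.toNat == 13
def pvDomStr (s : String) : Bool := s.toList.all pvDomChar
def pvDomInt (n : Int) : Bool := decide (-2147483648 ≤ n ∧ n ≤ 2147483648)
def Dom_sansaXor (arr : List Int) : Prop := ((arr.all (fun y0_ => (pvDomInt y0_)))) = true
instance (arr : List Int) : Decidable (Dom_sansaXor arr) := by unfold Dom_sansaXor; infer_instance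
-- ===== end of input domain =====

-- B replaces A's length-parity branch + stride-2 index loop by one branch-free enumerate
-- pass that masks each element by the parity of its subarray count (i+1)*(n-i); same cost.


-- ===== PORT A =====
def sansaXor (arr : List Int) : Int :=
  let n : Int := PySem.List.len arr
  if PySem.Int.mod n 2 == 0 then 0
  else
    (PySem.List.pyRange 0 n 2).foldl
      (fun result i => PySem.Int.bxor result (PySem.List.pyGetD arr i 0)) 0

-- ===== PORT B =====
def sansaXor_alt (arr : List Int) : Int :=
  let n : Int := PySem.List.len arr
  (PySem.List.enumerate arr).foldl
    (fun acc p => PySem.Int.bxor acc (p.2 * PySem.Int.mod ((p.1 + 1) * (n - p.1)) 2)) 0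

-- ===== PRECONDITION & SPEC =====
def Spec_sansaXor (arr : List Int) (out : Int) : Prop := out = sansaXor_alt arr
instance (arr : List Int) (out : Int) : Decidable (Spec_sansaXor arr out) := by unfold Spec_sansaXor; infer_instance

-- ===== CLAIM (what is proved, stated in full; the proofs are below) =====
def Claim_equal_sansaXor : Prop := ∀ (arr : List Int), Dom_sansaXor arr → Spec_sansaXor arr (sansaXor arr)

-- ===== LEMMAS AND PROOFS =====

-- the even indices below n, in order, are 2*0, 2*1, …, 2*((n+1)/2 - 1)
lemma filter_even_range (n : Nat) :
    (List.range n).filter (fun k => k % 2 == 0) =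
      (List.range ((n + 1) / 2)).map (fun k => 2 * k) := by
  induction n with
  | zero => rfl
  | succ n ih =>
    rcases Nat.even_or_odd n with h | h
    · have hm0 : n % 2 = 0 := Nat.even_iff.mp h
      have h1 : (n + 1 + 1) / 2 = (n + 1) / 2 + 1 := by omega
      have h2 : 2 * ((n + 1) / 2) = n := by omega
      rw [List.range_succ, List.filter_append, ih, h1, List.range_succ, List.map_append]
      simp only [List.filter_cons, List.filter_nil, hm0, List.map_cons, List.map_nil]
      simp [h2]
    · have hm1 : n % 2 = 1 := Nat.odd_iff.mp h
      have h1 : (n + 1 + 1) / 2 = (n + 1) / 2 := by omega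
      rw [List.range_succ, List.filter_append, ih, h1]
      simp [hm1]

-- the subarray-occurrence count of index k in an array of length n, reduced mod 2
lemma count_val (n k : Nat) :
    PySem.Int.mod (((k : Int) + 1) * ((n : Int) - (k : Int))) 2 =
      if n % 2 = 1 ∧ k % 2 = 0 then 1 else 0 := by
  rw [PySem.Int.mod_eq_emod_of_pos (by norm_num), Int.mul_emod]
  rcases Nat.even_or_odd n with hn | hn <;> rcases Nat.even_or_odd k with hk | hk <;>
    obtain ⟨a, ha⟩ := hn <;> obtain ⟨b, hb⟩ := hk
  · have hn2 : n % 2 = 0 := by omega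
    have f1 : ((k : Int) + 1) % 2 = 1 := by omega
    have f2 : ((n : Int) - (k : Int)) % 2 = 0 := by omega
    rw [f1, f2]; simp [hn2]
  · have hn2 : n % 2 = 0 := by omega
    have f1 : ((k : Int) + 1) % 2 = 0 := by omega
    rw [f1]; simp [hn2]
  · have hn2 : n % 2 = 1 := by omega
    have hk2 : k % 2 = 0 := by omega
    have f1 : ((k : Int) + 1) % 2 = 1 := by omega
    have f2 : ((n : Int) - (k : Int)) % 2 = 1 := by omega
    rw [f1, f2]; simp [hn2, hk2]
  · have hk2 : k % 2 = 1 := by omega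
    have f1 : ((k : Int) + 1) % 2 = 0 := by omega
    rw [f1]; simp [hk2]

-- a fold whose step never changes the accumulator returns its initial value
lemma foldl_id {α : Type} (l : List α) (init : Int) :
    l.foldl (fun (r : Int) (_ : α) => r) init = init := by
  induction l with
  | nil => rfl
  | cons x xs ih => simp [ih]

theorem sansaXor_spec : Claim_equal_sansaXor := by
  intro arr _
  show sansaXor arr = sansaXor_alt arr
  have hlen : PySem.List.len arr = ((arr.length : Nat) : Int) := rfl
  simp only [sansaXor, sansaXor_alt, hlen]
  rw [PySem.List.enumerate_eq_map_pyRange arr 0, List.foldl_map, hlen,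
    PySem.List.pyRange_zero_natCast, List.foldl_map]
  -- rewrite B's loop body pointwise using count_val and pyGetD_natCast
  rw [PySem.List.foldl_congr_mem (List.range arr.length) _
    (fun (result : Int) (k : Nat) =>
      if (decide (arr.length % 2 = 1) && decide (k % 2 = 0)) = true then
        PySem.Int.bxor result (arr.getD k 0)
      else result) 0
    (by
      intro acc k _
      simp only [count_val arr.length k, PySem.List.pyGetD_natCast]
      by_cases h : arr.length % 2 = 1 ∧ k % 2 = 0
      · simp [h]
      · simp only [if_neg h, mul_zero, PySem.Int.bxor_zero]
        rw [if_neg]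
        simp only [Bool.and_eq_true, decide_eq_true_eq]
        tauto)]
  rcases Nat.even_or_odd arr.length with hn | hn
  · -- even length: A returns 0 and B's mask is always 0
    have h2 : arr.length % 2 = 0 := Nat.even_iff.mp hn
    have hm : (PySem.Int.mod ((arr.length : Int)) 2 == 0) = true := by
      rw [PySem.Int.mod_eq_emod_of_pos (by norm_num)]
      simp only [beq_iff_eq]
      omega
    rw [hm]
    simp only [if_true]
    rw [PySem.List.foldl_congr_mem (List.range arr.length) _
      (fun (result : Int) (_ : Nat) => result) 0
      (by intro acc k _; simp [h2])]
    rw [foldl_id]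
  · -- odd length: both sides XOR the elements at even indices
    have h2 : arr.length % 2 = 1 := Nat.odd_iff.mp hn
    have hm : (PySem.Int.mod ((arr.length : Int)) 2 == 0) = false := by
      rw [PySem.Int.mod_eq_emod_of_pos (by norm_num)]
      simp only [beq_eq_false_iff_ne, ne_eq]
      omega
    rw [hm]
    simp only [Bool.false_eq_true, if_false]
    rw [PySem.List.foldl_congr_mem (List.range arr.length) _
      (fun (result : Int) (k : Nat) =>
        if (k % 2 == 0) = true then PySem.Int.bxor result (arr.getD k 0) else result) 0
      (by intro acc k _; simp [h2])]
    rw [← List.foldl_filter, filter_even_range, List.foldl_map]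
    rw [PySem.List.pyRange_of_pos 0 (arr.length : Int) (by norm_num)]
    have hrange : (if (0 : Int) < (arr.length : Int) then
        (((arr.length : Int) - 0 + 2 - 1) / 2).toNat else 0) = (arr.length + 1) / 2 := by
      have hpos : (0 : Int) < (arr.length : Int) := by omega
      rw [if_pos hpos]
      omega
    rw [hrange, List.foldl_map]
    apply PySem.List.foldl_congr_mem
    intro acc k _
    have hc : (0 : Int) + 2 * (k : Int) = ((2 * k : Nat) : Int) := by push_cast; ring
    rw [hc, PySem.List.pyGetD_natCast]
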